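-- pv_equiv track=rewrite | github.com/ZCloud-Firstserver/japan-postal-code | makejsonpdata-from-csv.py | normalize_city_en
-- ===== SOURCE A (Python) =====
-- def normalize_city_en(city_ro):
--     """ Normalize english city name
--     >>> normalize_city_en('KUMA GUN ITSUKI MURA')
--     'Itsuki-mura, Kuma-gun'
--     >>> normalize_city_en('OSAKA SHI CHUO KU')
--     'Chuo-ku, Osaka-shi'
--     >>> normalize_city_en('NAGOYA SHI CHIKUSA KU')
--     'Chikusa-ku, Nagoya-shi'
--     >>> normalize_city_en('SEMBOKU SHI')
--     'Semboku-shi'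
--     >>> normalize_city_en('AOMORI SHI')
--     'Aomori-shi'
--     >>> normalize_city_en('DATE GUN KORI MACHI')
--     'Kori-machi, Date-gun'
--     >>> normalize_city_en('OSAKI SHI')
--     'Osaki-shi'
--     >>> normalize_city_en('ISHIKARI GUN TOBETSU CHO')
--     'Tobetsu-cho, Ishikari-gun'
--     >>> normalize_city_en('SAIHAKU GUN HIEZU SON')
--     'Hiezu-son, Saihaku-gun'
--     """
--
--     words = city_ro.split(' ')
--     words = map(lambda word: word.capitalize(), words)
--     sections = []
--     section_words = []
--     for word in words:
--         if word in ['Shi', 'Ku', 'Gun', 'Cho', 'Machi', 'Son', 'Mura']: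
--             section_words.append(''.join(['-', word.lower()]))
--             sections.append(''.join(section_words))
--             section_words = []
--         else:
--             section_words.append(word)
--
--     if 0 < len(section_words):
--         sections.append(' '.join(section_words))
--
--     sections.reverse()
--     city_en = ', '.join(sections)
--     return city_en
-- ===== SOURCE B (Python) =====
-- def _run(rev, suffixes):
--     """Split off the leading run of non-suffix words: (run, remainder)."""
--     i = 0
--     while i < len(rev) and rev[i] not in suffixes:
--         i += 1
--     return rev[:i], rev[i:]
--
--
-- def normalize_city_en(city_ro):
--     """Scan the REVERSED word list, emitting sections directly in output order
--     (no final reverse): first the trailing run as the space-joined head section,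
--     then, for each suffix encountered, its (reversed) run of preceding words."""
--     suffixes = ('Shi', 'Ku', 'Gun', 'Cho', 'Machi', 'Son', 'Mura')
--     rev = [w.capitalize() for w in city_ro.split(' ')][::-1]
--     grp, rev = _run(rev, suffixes)
--     out = [' '.join(reversed(grp))] if grp else []
--     while rev:
--         suf, tail = rev[0], rev[1:]
--         grp, rev = _run(tail, suffixes)
--         out.append(''.join(reversed(grp)) + '-' + suf.lower())
--     return ', '.join(out)
-- ===== Notes on version B (the rewrite author's own statement) =====
-- stated objective: alternative
-- what changed: B reverses the capitalized word list first and scans it with a run-splitting helper, emitting the formatted sections directly in final output order (trailing group first, then one section per suffix encountered), so there is no accumulate-and-flush state and no final reversal.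
import Mathlib
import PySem

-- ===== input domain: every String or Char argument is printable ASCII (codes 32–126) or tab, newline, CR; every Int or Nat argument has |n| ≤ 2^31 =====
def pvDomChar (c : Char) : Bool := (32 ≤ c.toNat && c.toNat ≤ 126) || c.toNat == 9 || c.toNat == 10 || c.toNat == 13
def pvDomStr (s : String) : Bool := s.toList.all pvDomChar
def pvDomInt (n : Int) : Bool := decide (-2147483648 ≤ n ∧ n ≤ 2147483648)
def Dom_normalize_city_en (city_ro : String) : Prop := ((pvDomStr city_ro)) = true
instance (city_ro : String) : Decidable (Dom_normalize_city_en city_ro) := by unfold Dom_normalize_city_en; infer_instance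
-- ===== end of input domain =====

-- B scans the REVERSED word list with a run-splitting helper and emits sections directly in
-- output order (no flush state, no final reverse); same result, objective: alternative.

-- word.capitalize(): first char uppercased, rest lowered (exact on the ASCII domain)
def pvCap (w : List Char) : List Char :=
  match w with
  | [] => []
  | c :: cs => PySem.Chars.upperChar c :: PySem.Chars.lower cs

def pvSuffixes : List (List Char) :=
  ["Shi".toList, "Ku".toList, "Gun".toList, "Cho".toList, "Machi".toList, "Son".toList, "Mura".toList]

-- ===== PORT A =====
-- A's loop body: state = (sections, section_words)
def pvStepA (st : List (List Char) × List (List Char)) (w : List Char) :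
    List (List Char) × List (List Char) :=
  if w ∈ pvSuffixes then
    (st.1 ++ [PySem.Chars.join [] (st.2 ++ [['-'] ++ PySem.Chars.lower w])], [])
  else
    (st.1, st.2 ++ [w])

def normalize_city_en (city_ro : String) : String :=
  let words := (PySem.Chars.splitOn city_ro.toList [' ']).map pvCap
  let st := words.foldl pvStepA ([], [])
  let sections := if 0 < st.2.length then st.1 ++ [PySem.Chars.join [' '] st.2] else st.1
  String.ofList (PySem.Chars.join [',', ' '] sections.reverse)

-- ===== PORT B =====
-- B's _run: split off the leading run of non-suffix words (recursion = the index while-loop)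
def pvRun : List (List Char) → List (List Char) × List (List Char)
  | [] => ([], [])
  | w :: ws =>
    if w ∈ pvSuffixes then ([], w :: ws)
    else
      let p := pvRun ws
      (w :: p.1, p.2)

-- termination measure for B's outer while-loop: the remainder never grows
lemma pvRun_snd_len (xs : List (List Char)) : (pvRun xs).2.length ≤ xs.length := by
  induction xs with
  | nil => simp [pvRun]
  | cons w ws ih =>
    simp only [pvRun]
    split
    · simp
    · exact Nat.le_succ_of_le ih

-- B's outer while-loop: one formatted section per suffix encountered in the reversed list
def pvSecs : List (List Char) → List (List Char)
  | [] => []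
  | suf :: tail =>
    (PySem.Chars.join [] (pvRun tail).1.reverse ++ ['-'] ++ PySem.Chars.lower suf)
      :: pvSecs (pvRun tail).2
termination_by l => l.length
decreasing_by
  exact Nat.lt_succ_of_le (pvRun_snd_len tail)

def normalize_city_en_alt (city_ro : String) : String :=
  let rev := ((PySem.Chars.splitOn city_ro.toList [' ']).map pvCap).reverse
  let p := pvRun rev
  let out := (if p.1 ≠ [] then [PySem.Chars.join [' '] p.1.reverse] else []) ++ pvSecs p.2
  String.ofList (PySem.Chars.join [',', ' '] out)

-- ===== PRECONDITION & SPEC =====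
def Spec_normalize_city_en (city_ro : String) (out : String) : Prop := out = normalize_city_en_alt city_ro
instance (city_ro : String) (out : String) : Decidable (Spec_normalize_city_en city_ro out) := by unfold Spec_normalize_city_en; infer_instance

-- ===== CLAIM (what is proved, stated in full; the proofs are below) =====
def Claim_equal_normalize_city_en : Prop := ∀ (city_ro : String), Dom_normalize_city_en city_ro → Spec_normalize_city_en city_ro (normalize_city_en city_ro)

-- ===== LEMMAS AND PROOFS =====

lemma pv_join_nil_append (xs : List (List Char)) (y : List Char) :
    PySem.Chars.join [] (xs ++ [y]) = PySem.Chars.join [] xs ++ y := by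
  induction xs with
  | nil => simp [PySem.Chars.join, List.intercalate]
  | cons x xs ih =>
    cases xs with
    | nil => simp [PySem.Chars.join, List.intercalate]
    | cons z zs =>
      simp only [PySem.Chars.join, List.intercalate] at *
      simp_all [List.intersperse]

-- invariant tying A's foldl state over ws to B's run/section decomposition of ws.reverse
lemma pv_inv (ws : List (List Char)) :
    (pvRun ws.reverse).1 = (ws.foldl pvStepA ([], [])).2.reverse ∧
    pvSecs (pvRun ws.reverse).2 = (ws.foldl pvStepA ([], [])).1.reverse := by
  induction ws using List.reverseRecOn with
  | nil => simp [pvRun, pvSecs]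
  | append_singleton xs x ih =>
    obtain ⟨ih1, ih2⟩ := ih
    rw [List.foldl_append, List.foldl_cons, List.foldl_nil, List.reverse_append,
      List.reverse_singleton, List.singleton_append]
    by_cases h : x ∈ pvSuffixes
    · simp only [pvStepA, h, if_pos]
      constructor
      · simp [pvRun, h]
      · simp [pvRun, h, pvSecs, ih1, ih2, pv_join_nil_append]
    · simp only [pvStepA, h, if_neg, not_false_iff]
      constructor
      · simp [pvRun, h, ih1]
      · simpa [pvRun, h] using ih2

-- ===== VERDICT (by name: the statement is the Claim_ definition above) =====
theorem normalize_city_en_spec : Claim_equal_normalize_city_en := by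
  intro city_ro _
  unfold Spec_normalize_city_en normalize_city_en normalize_city_en_alt
  dsimp only
  obtain ⟨h1, h2⟩ := pv_inv ((PySem.Chars.splitOn city_ro.toList [' ']).map pvCap)
  rw [h1, h2, List.reverse_reverse]
  rcases (((PySem.Chars.splitOn city_ro.toList [' ']).map pvCap).foldl pvStepA ([], []))
    with ⟨gs, cur⟩
  cases cur <;> simp
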